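-- pv_equiv track=rewrite | github.com/linvieson/skyscrapers_project | skyscrapers.py | check_uniqueness_in_rows
-- ===== SOURCE A (Python) =====
-- def check_uniqueness_in_rows(board: list) -> bool:
--     """
--     Check buildings of unique height in each row.
--
--     Return True if buildings in a row have unique length, False otherwise.
--
--     >>> check_uniqueness_in_rows(['***21**', '412453*', '423145*', '*543215',\
--  '*35214*', '*41532*', '*2*1***'])
--     True
--     >>> check_uniqueness_in_rows(['***21**', '452453*', '423145*', '*543215',\
--  '*35214*', '*41532*', '*2*1***'])
--     False
--     >>> check_uniqueness_in_rows(['***21**', '412453*', '423145*', '*553215',\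
--  '*35214*', '*41532*', '*2*1***'])
--     False
--     """
--     for line in board:
--         saw = []
--         for elem in line[1:-1]:
--             if elem == '*':
--                 continue
--             if elem not in saw:
--                 saw.append(elem)
--             else:
--                 return False
--     return True
-- ===== SOURCE B (Python) =====
-- def check_uniqueness_in_rows(board: list) -> bool:
--     return all(len(c) == len(set(c))
--                for c in ([e for e in line[1:-1] if e != '*'] for line in board))
-- ===== Notes on version B (the rewrite author's own statement) =====
-- stated objective: idiomatic
-- what changed: Replaces the inner incremental seen-list loop with early return by building the full filtered row and comparing its length to the cardinality of its set, wrapped in a single all(...) expression.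
import Mathlib
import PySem

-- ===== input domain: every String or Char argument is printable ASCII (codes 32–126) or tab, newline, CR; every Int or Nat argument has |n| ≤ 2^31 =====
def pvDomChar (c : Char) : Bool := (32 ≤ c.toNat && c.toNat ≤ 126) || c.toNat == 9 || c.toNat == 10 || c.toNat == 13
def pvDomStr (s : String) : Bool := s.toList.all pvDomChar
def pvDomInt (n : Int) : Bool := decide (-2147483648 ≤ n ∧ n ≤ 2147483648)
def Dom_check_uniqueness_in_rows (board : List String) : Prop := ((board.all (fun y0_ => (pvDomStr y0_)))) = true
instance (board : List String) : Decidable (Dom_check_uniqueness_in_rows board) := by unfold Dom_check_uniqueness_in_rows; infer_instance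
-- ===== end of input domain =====

-- B replaces A's inner seen-list loop (early return on duplicate) with a per-row
-- length-vs-set-cardinality comparison inside one all(...) expression (idiomatic).

-- ===== PORT A =====
-- inner loop: 'for elem in line[1:-1]: …' with the growing 'saw' list; false = early 'return False'
def pvRowA : List Char → List Char → Bool
  | [], _ => true
  | e :: rest, saw =>
    if e == '*' then pvRowA rest saw
    else if !(saw.contains e) then pvRowA rest (saw ++ [e])
    else false

-- outer loop: 'for line in board: …'
def pvGoA : List String → Bool
  | [] => true
  | line :: rest =>
    if pvRowA (PySem.List.slice line.toList (some 1) (some (-1))) [] then pvGoA rest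
    else false

def check_uniqueness_in_rows (board : List String) : Bool := pvGoA board

-- ===== PORT B =====
def check_uniqueness_in_rows_alt (board : List String) : Bool :=
  board.all (fun line =>
    let c := (PySem.List.slice line.toList (some 1) (some (-1))).filter (fun e => e != '*')
    c.length == (PySem.Set.ofList c).length)

-- ===== PRECONDITION & SPEC =====
def Spec_check_uniqueness_in_rows (board : List String) (out : Bool) : Prop := out = check_uniqueness_in_rows_alt board
instance (board : List String) (out : Bool) : Decidable (Spec_check_uniqueness_in_rows board out) := by unfold Spec_check_uniqueness_in_rows; infer_instance

-- ===== CLAIM (what is proved, stated in full; the proofs are below) =====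
def Claim_equal_check_uniqueness_in_rows : Prop := ∀ (board : List String), Dom_check_uniqueness_in_rows board → Spec_check_uniqueness_in_rows board (check_uniqueness_in_rows board)

-- ===== LEMMAS AND PROOFS =====

-- A's inner loop succeeds iff the non-'*' elements are pairwise distinct and avoid 'saw'
theorem pvRowA_iff (s : List Char) : ∀ saw : List Char,
    pvRowA s saw = true ↔
      ((s.filter (fun e => e != '*')).Nodup ∧ ∀ a ∈ s.filter (fun e => e != '*'), a ∉ saw) := by
  induction s with
  | nil => intro saw; simp [pvRowA]
  | cons e rest ih =>
    intro saw
    by_cases hstar : e = '*'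
    · subst hstar; simpa [pvRowA] using ih saw
    · have hf : (e != '*') = true := by simp [hstar]
      rw [show List.filter (fun e => e != '*') (e :: rest) = e :: List.filter (fun e => e != '*') rest from List.filter_cons_of_pos hf]
      by_cases hmem : e ∈ saw
      · have hfalse : pvRowA (e :: rest) saw = false := by
          simp [pvRowA, hstar, List.contains_eq_mem, hmem]
        rw [hfalse]
        constructor
        · intro h; exact absurd h (by simp)
        · rintro ⟨-, h⟩
          exact absurd hmem (h e (List.mem_cons_self ..))
      · have hstep : pvRowA (e :: rest) saw = pvRowA rest (saw ++ [e]) := by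
          simp [pvRowA, hstar, List.contains_eq_mem, hmem]
        rw [hstep, ih (saw ++ [e])]
        constructor
        · rintro ⟨hnd, h⟩
          refine ⟨List.nodup_cons.2 ⟨fun hein => ?_, hnd⟩, ?_⟩
          · exact (h e hein) (List.mem_append.2 (Or.inr (List.mem_singleton.2 rfl)))
          · intro a ha
            rcases List.mem_cons.1 ha with rfl | ha'
            · exact hmem
            · intro haw; exact (h a ha') (List.mem_append.2 (Or.inl haw))
        · rintro ⟨hnd, h⟩
          have hnd' := List.nodup_cons.1 hnd
          refine ⟨hnd'.2, fun a ha haw => ?_⟩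
          rcases List.mem_append.1 haw with haw | haw
          · exact (h a (List.mem_cons.2 (Or.inr ha))) haw
          · rw [List.mem_singleton] at haw; subst haw
            exact hnd'.1 ha

-- set cardinality equals length iff no duplicates
theorem len_ofList_iff (c : List Char) :
    (c.length == (PySem.Set.ofList c).length) = true ↔ c.Nodup := by
  induction c using List.reverseRecOn with
  | nil => simp [PySem.Set.ofList]
  | append_singleton xs x ih =>
    rw [PySem.Set.ofList_append_singleton, PySem.Set.add]
    by_cases hx : PySem.Set.contains (PySem.Set.ofList xs) x = true
    · rw [if_pos hx]
      have hle := PySem.Set.length_ofList_le (xs := xs)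
      have hxm : x ∈ xs := (PySem.Set.mem_ofList ..).1 ((PySem.Set.contains_iff ..).1 hx)
      constructor
      · intro h
        rw [beq_iff_eq] at h
        simp only [List.length_append, List.length_singleton] at h
        omega
      · intro h
        exact ((List.nodup_append.1 h).2.2 x hxm x (List.mem_singleton.2 rfl) rfl).elim
    · rw [if_neg hx]
      have hxm : x ∉ xs := fun hm =>
        hx ((PySem.Set.contains_iff ..).2 ((PySem.Set.mem_ofList ..).2 hm))
      constructor
      · intro h
        rw [beq_iff_eq] at h
        simp only [List.length_append, List.length_singleton] at h
        have hnd : xs.Nodup := ih.1 (by rw [beq_iff_eq]; omega)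
        refine List.nodup_append.2 ⟨hnd, List.nodup_singleton x, ?_⟩
        intro a ha b hb
        rw [List.mem_singleton] at hb; subst hb
        rintro rfl; exact hxm ha
      · intro h
        have := ih.2 (List.nodup_append.1 h).1
        rw [beq_iff_eq] at this ⊢
        simp only [List.length_append, List.length_singleton]
        omega

theorem row_eq (s : List Char) :
    pvRowA s [] =
      ((s.filter (fun e => e != '*')).length ==
        (PySem.Set.ofList (s.filter (fun e => e != '*'))).length) := by
  rw [Bool.eq_iff_iff, pvRowA_iff s [], len_ofList_iff]
  simp

theorem goA_eq (board : List String) :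
    pvGoA board = board.all (fun line =>
      let c := (PySem.List.slice line.toList (some 1) (some (-1))).filter (fun e => e != '*')
      c.length == (PySem.Set.ofList c).length) := by
  induction board with
  | nil => rfl
  | cons line rest ih =>
    rw [List.all_cons, pvGoA, row_eq, ih]
    cases hb : (((PySem.List.slice line.toList (some 1) (some (-1))).filter
        (fun e => e != '*')).length ==
        (PySem.Set.ofList ((PySem.List.slice line.toList (some 1) (some (-1))).filter
          (fun e => e != '*'))).length) <;> simp [hb]

-- ===== VERDICT (by name: the statement is the Claim_ definition above) =====
theorem check_uniqueness_in_rows_spec : Claim_equal_check_uniqueness_in_rows := by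
  intro board _
  show check_uniqueness_in_rows board = check_uniqueness_in_rows_alt board
  exact goA_eq board
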